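-- pv_equiv track=rewrite | github.com/RafaelBroseghini/World-Cup-App | worldcup.py | build_roster
-- ===== SOURCE A (Python) =====
-- def build_roster(lst1, lst2):
--     matches_dict = {}
--     players_dict = {}
--     for date in lst1:
--         if date[0] not in matches_dict:
--             matches_dict[date[0]] = 1
--     for p in lst2:
--         for m in matches_dict:
--             if p[0] == m and p[1] not in players_dict:
--                 if p[2] != "":
--                     players_dict[p[1]] = {p[2]:1,"Number":p[3]}
--                 else:
--                     players_dict[p[1]] = {"Number":p[3]}
--             elif p[1] in players_dict and p[2] != "" and p[0] == m:
--                 players_dict[p[1]][p[2]] = 1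
--     return players_dict
-- ===== SOURCE B (Python) =====
-- def build_roster(lst1, lst2):
--     # Pass 1: index valid match ids, then group each admitted row under its player's name.
--     valid = {row[0] for row in lst1}
--     groups = {}
--     for p in lst2:
--         if p[0] in valid:
--             groups.setdefault(p[1], []).append(p)
--     # Pass 2: build each player's entry from its group, in first-seen name order.
--     result = {}
--     for name, rows in groups.items():
--         first = rows[0]
--         entry = {}
--         if first[2] != "":
--             entry[first[2]] = 1
--         entry["Number"] = first[3]
--         for r in rows[1:]:
--             if r[2] != "":
--                 entry[r[2]] = 1
--         result[name] = entry
--     return result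
-- ===== Notes on version B (the rewrite author's own statement) =====
-- stated objective: alternative
-- what changed: B replaces A's incrementally-updated single scan with an inner loop over all match ids by a set-membership filter plus a group-by-name index built in one pass, then a second pass that builds each player's entry from its whole group at once.
import Mathlib
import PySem

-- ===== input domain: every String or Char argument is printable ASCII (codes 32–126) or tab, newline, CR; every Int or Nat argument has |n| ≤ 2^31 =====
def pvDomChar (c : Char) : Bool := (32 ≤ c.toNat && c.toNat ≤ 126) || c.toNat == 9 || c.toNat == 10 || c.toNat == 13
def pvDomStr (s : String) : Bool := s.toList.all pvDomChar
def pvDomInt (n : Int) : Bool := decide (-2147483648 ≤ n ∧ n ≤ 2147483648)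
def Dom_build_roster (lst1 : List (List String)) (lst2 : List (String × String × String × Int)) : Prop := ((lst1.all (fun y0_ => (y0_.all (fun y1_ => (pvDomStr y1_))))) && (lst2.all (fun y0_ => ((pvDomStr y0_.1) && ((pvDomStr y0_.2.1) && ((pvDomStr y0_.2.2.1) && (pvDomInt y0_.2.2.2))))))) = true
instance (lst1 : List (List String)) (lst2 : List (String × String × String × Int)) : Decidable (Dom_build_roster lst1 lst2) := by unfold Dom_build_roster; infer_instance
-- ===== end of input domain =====

-- B replaces A's single incrementally-updating scan (with an inner loop over all match
-- keys) by a set-membership filter plus a group-by-name index, then a second pass that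
-- builds each player's entry from his whole group at once: an alternative decomposition.

-- ===== PORT A =====
-- loop body of 'for date in lst1': date[0] raises IndexError on an empty row, which
-- Pre_ excludes; pyGetD's fallback value "" is never reached under Pre_.
def pvMatchStep (md : PySem.Dict String Int) (date : List String) : PySem.Dict String Int :=
  let k := PySem.List.pyGetD date 0 ""
  if md.contains k then md else md.insert k 1

-- loop body of 'for m in matches_dict' (iterating the dict's keys in insertion order);
-- 'players_dict[p[1]][p[2]] = 1' is Dict.modify — exact, since the branch guard
-- guarantees the key p[1] is present so the default is never used.
def pvPlayerInner (p : String × String × String × Int)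
    (pd : PySem.Dict String (PySem.Dict String Int)) (m : String) :
    PySem.Dict String (PySem.Dict String Int) :=
  if p.1 == m && !pd.contains p.2.1 then
    (if p.2.2.1 ≠ "" then
      pd.insert p.2.1 (PySem.Dict.ofList [(p.2.2.1, (1 : Int)), ("Number", p.2.2.2)])
    else
      pd.insert p.2.1 (PySem.Dict.ofList [("Number", p.2.2.2)]))
  else if pd.contains p.2.1 && p.2.2.1 != "" && p.1 == m then
    pd.modify p.2.1 PySem.Dict.empty (fun e => e.insert p.2.2.1 1)
  else pd

def build_roster (lst1 : List (List String)) (lst2 : List (String × String × String × Int)) : List (String × List (String × Int)) :=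
  let mdict : PySem.Dict String Int := lst1.foldl pvMatchStep PySem.Dict.empty
  let players : PySem.Dict String (PySem.Dict String Int) :=
    lst2.foldl (fun pd p => mdict.keys.foldl (pvPlayerInner p) pd) PySem.Dict.empty
  players.items.map (fun q => (q.1, q.2.items))

-- ===== PORT B =====
-- pass-2 body: build one player's entry from his group's rows (the [] arm is
-- unreachable: groups only ever hold nonempty row lists).
def pvEntry (rows : List (String × String × String × Int)) : PySem.Dict String Int :=
  match rows with
  | [] => PySem.Dict.empty
  | first :: rest =>
    let e0 : PySem.Dict String Int :=
      if first.2.2.1 ≠ "" then PySem.Dict.empty.insert first.2.2.1 1 else PySem.Dict.empty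
    let e1 := e0.insert "Number" first.2.2.2
    rest.foldl (fun e r => if r.2.2.1 ≠ "" then e.insert r.2.2.1 1 else e) e1

-- pass-1 body: 'groups.setdefault(p[1], []).append(p)' is Dict.modify with default [].
def pvGroupStep (valid : PySem.Set String)
    (g : PySem.Dict String (List (String × String × String × Int)))
    (p : String × String × String × Int) :
    PySem.Dict String (List (String × String × String × Int)) :=
  if valid.contains p.1 then g.modify p.2.1 [] (fun rs => rs ++ [p]) else g

def build_roster_alt (lst1 : List (List String)) (lst2 : List (String × String × String × Int)) : List (String × List (String × Int)) :=
  -- row[0] raises on an empty row (excluded by Pre_); the fallback "" is never reached.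
  let valid : PySem.Set String := PySem.Set.ofList (lst1.map (fun row => PySem.List.pyGetD row 0 ""))
  let groups : PySem.Dict String (List (String × String × String × Int)) :=
    lst2.foldl (pvGroupStep valid) PySem.Dict.empty
  let result : PySem.Dict String (PySem.Dict String Int) :=
    groups.items.foldl (fun res q => res.insert q.1 (pvEntry q.2)) PySem.Dict.empty
  result.items.map (fun q => (q.1, q.2.items))

-- ===== PRECONDITION & SPEC =====
-- Pre_ excludes inputs where lst1 contains an empty row: there 'date[0]' raises
-- IndexError in A (and 'row[0]' raises in B too).
def Pre_build_roster (lst1 : List (List String)) (lst2 : List (String × String × String × Int)) : Prop :=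
  ∀ row ∈ lst1, row ≠ []

instance (lst1 : List (List String)) (lst2 : List (String × String × String × Int)) : Decidable (Pre_build_roster lst1 lst2) := by unfold Pre_build_roster; infer_instance

def pvWitness_build_roster : List (List String) × (List (String × String × String × Int)) :=
  ([["m1", "x"]], [("m1", "Ronaldo", "GK", 7), ("m1", "Ronaldo", "DF", 7)])

def Spec_build_roster (lst1 : List (List String)) (lst2 : List (String × String × String × Int)) (out : List (String × List (String × Int))) : Prop := out = build_roster_alt lst1 lst2
instance (lst1 : List (List String)) (lst2 : List (String × String × String × Int)) (out : List (String × List (String × Int))) : Decidable (Spec_build_roster lst1 lst2 out) := by unfold Spec_build_roster; infer_instance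

-- ===== CLAIM (what is proved, stated in full; the proofs are below) =====
def Claim_equal_build_roster : Prop := ∀ (lst1 : List (List String)) (lst2 : List (String × String × String × Int)), Dom_build_roster lst1 lst2 → Pre_build_roster lst1 lst2 → Spec_build_roster lst1 lst2 (build_roster lst1 lst2)

-- ===== LEMMAS AND PROOFS =====

-- ---- matches_dict: its keys are exactly B's 'valid' set ----

theorem pvKeys_matchStep (md : PySem.Dict String Int) (date : List String) :
    (pvMatchStep md date).keys = PySem.Set.add md.keys (PySem.List.pyGetD date 0 "") := by
  unfold pvMatchStep PySem.Set.add
  by_cases hc : md.contains (PySem.List.pyGetD date 0 "") = true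
  · have hm : PySem.List.pyGetD date 0 "" ∈ md.keys := (PySem.Dict.contains_iff_mem_keys md _).mp hc
    simp [hc, PySem.Set.contains, hm]
  · have hm : PySem.List.pyGetD date 0 "" ∉ md.keys := by
      intro h
      exact hc ((PySem.Dict.contains_iff_mem_keys md _).mpr h)
    rw [if_neg hc]
    rw [PySem.Dict.keys_insert_of_not_contains md _ (by simpa using hc)]
    simp [PySem.Set.contains, hm]

theorem pvKeys_matches (lst1 : List (List String)) :
    ∀ md : PySem.Dict String Int,
      (lst1.foldl pvMatchStep md).keys = PySem.Set.update md.keys (lst1.map (fun row => PySem.List.pyGetD row 0 "")) := by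
  induction lst1 with
  | nil => intro md; simp [PySem.Set.update]
  | cons d t ih =>
    intro md
    simp only [List.foldl_cons, List.map_cons, PySem.Set.update, ih, pvKeys_matchStep]

theorem pvKeys_matches_empty (lst1 : List (List String)) :
    (lst1.foldl pvMatchStep PySem.Dict.empty).keys = PySem.Set.ofList (lst1.map (fun row => PySem.List.pyGetD row 0 "")) := by
  rw [pvKeys_matches, PySem.Set.ofList_eq_foldl]
  rfl

-- ---- the inner loop over the match keys collapses to a single guarded step ----

theorem pvInner_skip (p : String × String × String × Int)
    (K : List String) (pd : PySem.Dict String (PySem.Dict String Int))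
    (h : p.1 ∉ K) : K.foldl (pvPlayerInner p) pd = pd := by
  induction K generalizing pd with
  | nil => rfl
  | cons m t ih =>
    have h1 : p.1 ≠ m := fun e => h (e ▸ List.mem_cons_self ..)
    have h2 : p.1 ∉ t := fun e => h (List.mem_cons_of_mem _ e)
    have hb : (p.1 == m) = false := beq_eq_false_iff_ne.mpr h1
    have hstep : pvPlayerInner p pd m = pd := by
      simp only [pvPlayerInner, hb, Bool.false_and]
      rw [if_neg (by simp), if_neg (by simp [hb])]
    simp only [List.foldl_cons, hstep]
    exact ih pd h2

theorem pvInner_collapse (p : String × String × String × Int)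
    (K : List String) (hnd : K.Nodup) (pd : PySem.Dict String (PySem.Dict String Int)) :
    K.foldl (pvPlayerInner p) pd = if K.contains p.1 then pvPlayerInner p pd p.1 else pd := by
  induction K generalizing pd with
  | nil => rfl
  | cons m t ih =>
    rcases List.nodup_cons.mp hnd with ⟨hm, hndt⟩
    by_cases he : p.1 = m
    · subst he
      have : t.foldl (pvPlayerInner p) (pvPlayerInner p pd p.1) = pvPlayerInner p pd p.1 :=
        pvInner_skip p t _ hm
      simp [List.foldl_cons, this]
    · have hb : (p.1 == m) = false := beq_eq_false_iff_ne.mpr he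
      have hstep : pvPlayerInner p pd m = pd := by
        simp only [pvPlayerInner, hb, Bool.false_and]
        rw [if_neg (by simp), if_neg (by simp [hb])]
      simp only [List.foldl_cons, hstep, ih hndt pd, List.contains_cons]
      simp [hb]

-- ---- relating A's player dict to B's groups ----

def pvMapD (g : PySem.Dict String (List (String × String × String × Int))) :
    PySem.Dict String (PySem.Dict String Int) :=
  PySem.Dict.mk (g.items.map (fun q => (q.1, pvEntry q.2)))

theorem pvEntry_append (rows : List (String × String × String × Int))
    (p : String × String × String × Int) (h : rows ≠ []) :
    pvEntry (rows ++ [p]) =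
      if p.2.2.1 ≠ "" then (pvEntry rows).insert p.2.2.1 1 else pvEntry rows := by
  cases rows with
  | nil => exact absurd rfl h
  | cons first rest =>
    simp only [pvEntry, List.cons_append, List.foldl_append, List.foldl_cons, List.foldl_nil]

def pvInv (g : PySem.Dict String (List (String × String × String × Int))) : Prop :=
  (∀ q ∈ g.items, q.2 ≠ []) ∧ g.keys.Nodup

theorem pvInv_step (valid : PySem.Set String)
    (g : PySem.Dict String (List (String × String × String × Int)))
    (p : String × String × String × Int) (h : pvInv g) : pvInv (pvGroupStep valid g p) := by
  obtain ⟨hne, hnd⟩ := h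
  unfold pvGroupStep
  by_cases hv : valid.contains p.1 = true
  · rw [if_pos hv]
    unfold PySem.Dict.modify
    by_cases hg : g.contains p.2.1 = true
    · constructor
      · intro q hq
        rw [PySem.Dict.items_insert_of_contains g _ hg] at hq
        rcases List.mem_map.mp hq with ⟨q', hq', hmap⟩
        by_cases hk : (q'.1 == p.2.1) = true
        · rw [if_pos hk] at hmap
          subst hmap
          simp
        · rw [if_neg hk] at hmap
          subst hmap
          exact hne q' hq'
      · rw [PySem.Dict.keys_insert_of_contains g _ hg]
        exact hnd
    · have hg' : g.contains p.2.1 = false := by simpa using hg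
      constructor
      · intro q hq
        rw [PySem.Dict.getD_of_not_contains g _ hg'] at hq
        unfold PySem.Dict.insert at hq
        rw [if_neg hg] at hq
        rcases List.mem_append.mp hq with h1 | h1
        · exact hne q h1
        · simp only [List.mem_singleton] at h1
          subst h1
          simp
      · rw [PySem.Dict.keys_insert_of_not_contains g _ hg']
        refine List.nodup_append.mpr ⟨hnd, List.nodup_singleton _, ?_⟩
        intro a ha b hb
        rw [List.mem_singleton] at hb
        subst hb
        intro e
        rw [e] at ha
        exact absurd ((PySem.Dict.contains_iff_mem_keys g _).mpr ha) (by simp [hg'])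
  · rw [if_neg hv]
    exact ⟨hne, hnd⟩

theorem pvInv_foldl (valid : PySem.Set String)
    (l : List (String × String × String × Int)) :
    ∀ g, pvInv g → pvInv (l.foldl (pvGroupStep valid) g) := by
  induction l with
  | nil => exact fun g h => h
  | cons p t ih => exact fun g h => ih _ (pvInv_step valid g p h)

theorem pvMapD_keys (g : PySem.Dict String (List (String × String × String × Int))) :
    (pvMapD g).keys = g.keys := by
  simp [pvMapD, PySem.Dict.keys, List.map_map]

theorem pvMapD_contains (g : PySem.Dict String (List (String × String × String × Int)))
    (k : String) : (pvMapD g).contains k = g.contains k := by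
  simp [pvMapD, PySem.Dict.contains, List.any_map, Function.comp_def]

theorem pvStep_comm (valid : PySem.Set String)
    (g : PySem.Dict String (List (String × String × String × Int)))
    (p : String × String × String × Int) (h : pvInv g) :
    (if valid.contains p.1 then pvPlayerInner p (pvMapD g) p.1 else pvMapD g)
      = pvMapD (pvGroupStep valid g p) := by
  obtain ⟨hne, hnd⟩ := h
  unfold pvGroupStep
  by_cases hv : valid.contains p.1 = true
  · rw [if_pos hv, if_pos hv]
    unfold PySem.Dict.modify
    by_cases hg : g.contains p.2.1 = true
    · -- the player is already present: only the elif branch can fire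
      have hpd : (pvMapD g).contains p.2.1 = true := by rw [pvMapD_contains]; exact hg
      have hrows : ∀ q ∈ g.items, q.1 = p.2.1 → g.getD p.2.1 [] = q.2 := by
        intro q hq hq1
        exact PySem.Dict.getD_of_mem_items g (by rw [← hq1]; exact hq) hnd []
      by_cases hp : p.2.2.1 = ""
      · -- no position: A leaves the dict unchanged; B's extra row adds nothing
        have hL : pvPlayerInner p (pvMapD g) p.1 = pvMapD g := by
          simp only [pvPlayerInner, beq_self_eq_true, Bool.true_and, Bool.and_true, hpd,
            Bool.not_true, Bool.and_false, hp]
          rw [if_neg (by simp), if_neg (by simp [hp])]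
        rw [hL]
        apply PySem.Dict.ext
        simp only [pvMapD, PySem.Dict.insert, hg, if_pos]
        rw [List.map_map]
        refine (List.map_congr_left ?_).symm
        intro q hq
        by_cases hk : (q.1 == p.2.1) = true
        · have h1 : q.1 = p.2.1 := by simpa using hk
          simp only [Function.comp, hk, if_pos]
          rw [hrows q hq h1]
          rw [pvEntry_append q.2 p (hne q hq), if_neg (by simp [hp]), h1]
        · simp [Function.comp, hk]
      · -- position present: A updates the entry in place, B appends the row
        have hsome : (g.get? p.2.1).isSome := by
          rw [← PySem.Dict.contains_eq_isSome_get?]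
          exact hg
        obtain ⟨rows, hrows0⟩ := Option.isSome_iff_exists.mp hsome
        have hgd : g.getD p.2.1 [] = rows := PySem.Dict.getD_of_get?_eq_some g [] hrows0
        have hmem : (p.2.1, rows) ∈ g.items := PySem.Dict.mem_items_of_get?_eq_some g hrows0
        have hgetG : (pvMapD g).getD p.2.1 PySem.Dict.empty = pvEntry rows := by
          apply PySem.Dict.getD_of_mem_items
          · exact List.mem_map.mpr ⟨(p.2.1, rows), hmem, rfl⟩
          · rw [pvMapD_keys]; exact hnd
        have hL : pvPlayerInner p (pvMapD g) p.1
            = (pvMapD g).insert p.2.1 ((pvEntry rows).insert p.2.2.1 1) := by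
          simp only [pvPlayerInner, beq_self_eq_true, Bool.true_and, Bool.and_true, hpd,
            Bool.not_true, Bool.and_false]
          rw [if_neg (by simp), if_pos (by simp [hp, hpd])]
          rw [PySem.Dict.modify, hgetG]
        rw [hL]
        apply PySem.Dict.ext
        rw [PySem.Dict.items_insert_of_contains _ _ hpd]
        have hitemsR : (g.insert p.2.1 ((fun rs => rs ++ [p]) (g.getD p.2.1 []))).items
            = g.items.map (fun q => if (q.1 == p.2.1) = true then (p.2.1, g.getD p.2.1 [] ++ [p]) else q) :=
          PySem.Dict.items_insert_of_contains g _ hg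
        simp only [pvMapD, hitemsR, List.map_map]
        refine List.map_congr_left ?_
        intro q hq
        simp only [Function.comp_def]
        by_cases hk : (q.1 == p.2.1) = true
        · have h1 : q.1 = p.2.1 := by simpa using hk
          have hq2 : rows = q.2 := by
            rw [← hgd]; exact hrows q hq h1
          rw [if_pos hk, if_pos hk, hgd, hq2]
          rw [pvEntry_append q.2 p (hne q hq), if_pos (by simp [hp])]
        · rw [if_neg hk, if_neg hk]
    · -- first occurrence of the player: A inserts the literal entry, B starts the group
      have hg' : g.contains p.2.1 = false := by simpa using hg
      have hpd : (pvMapD g).contains p.2.1 = false := by rw [pvMapD_contains]; exact hg'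
      have hfirst : ∀ lit, (pvMapD g).insert p.2.1 lit
          = PySem.Dict.mk ((pvMapD g).items ++ [(p.2.1, lit)]) := by
        intro lit
        simp [PySem.Dict.insert, hpd]
      rw [PySem.Dict.getD_of_not_contains g _ hg']
      have hR : pvMapD (g.insert p.2.1 ((fun rs => rs ++ [p]) []))
          = PySem.Dict.mk ((pvMapD g).items ++ [(p.2.1, pvEntry [p])]) := by
        apply PySem.Dict.ext
        simp [pvMapD, PySem.Dict.insert, hg]
      rw [hR]
      by_cases hp : p.2.2.1 = ""
      · have hL : pvPlayerInner p (pvMapD g) p.1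
            = (pvMapD g).insert p.2.1 (PySem.Dict.ofList [("Number", p.2.2.2)]) := by
          simp only [pvPlayerInner, beq_self_eq_true, Bool.true_and, hpd, Bool.not_false]
          rw [if_pos (by simp), if_neg (by simp [hp])]
        rw [hL, hfirst]
        have : pvEntry [p] = PySem.Dict.ofList [("Number", p.2.2.2)] := by
          simp [pvEntry, hp, PySem.Dict.ofList, PySem.Dict.update]
        rw [this]
      · have hL : pvPlayerInner p (pvMapD g) p.1
            = (pvMapD g).insert p.2.1 (PySem.Dict.ofList [(p.2.2.1, (1 : Int)), ("Number", p.2.2.2)]) := by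
          simp only [pvPlayerInner, beq_self_eq_true, Bool.true_and, hpd, Bool.not_false]
          rw [if_pos (by simp), if_pos (by simp [hp])]
        rw [hL, hfirst]
        have : pvEntry [p] = PySem.Dict.ofList [(p.2.2.1, (1 : Int)), ("Number", p.2.2.2)] := by
          simp [pvEntry, hp, PySem.Dict.ofList, PySem.Dict.update]
        rw [this]
  · rw [if_neg hv, if_neg hv]

theorem pvMain (valid : PySem.Set String) (l : List (String × String × String × Int)) :
    ∀ g, pvInv g →
      l.foldl (fun pd p => if valid.contains p.1 then pvPlayerInner p pd p.1 else pd) (pvMapD g)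
        = pvMapD (l.foldl (pvGroupStep valid) g) := by
  induction l with
  | nil => intro g _; rfl
  | cons p t ih =>
    intro g hg
    simp only [List.foldl_cons]
    rw [pvStep_comm valid g p hg]
    exact ih _ (pvInv_step valid g p hg)

-- ===== VERDICT (by name: the statement is the Claim_ definition above) =====
theorem build_roster_spec : Claim_equal_build_roster := by
  intro lst1 lst2 _ _
  unfold Spec_build_roster build_roster build_roster_alt
  dsimp only
  have hK := pvKeys_matches_empty lst1
  have hnd : (PySem.Set.ofList (lst1.map (fun row => PySem.List.pyGetD row 0 ""))).Nodup :=
    PySem.Set.nodup_ofList _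
  have hfun : (fun pd (p : String × String × String × Int) =>
        ((lst1.foldl pvMatchStep PySem.Dict.empty).keys).foldl (pvPlayerInner p) pd)
      = (fun pd (p : String × String × String × Int) =>
        if (PySem.Set.ofList (lst1.map (fun row => PySem.List.pyGetD row 0 ""))).contains p.1 then
          pvPlayerInner p pd p.1 else pd) := by
    funext pd p
    rw [hK]
    exact pvInner_collapse p _ hnd pd
  rw [hfun]
  have hinv : pvInv PySem.Dict.empty :=
    ⟨(fun _ hq => nomatch hq), List.nodup_nil⟩
  have hmain := pvMain (PySem.Set.ofList (lst1.map (fun row => PySem.List.pyGetD row 0 "")))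
    lst2 PySem.Dict.empty hinv
  have hmapd : pvMapD PySem.Dict.empty = PySem.Dict.empty := rfl
  rw [hmapd] at hmain
  rw [hmain]
  have hG := pvInv_foldl (PySem.Set.ofList (lst1.map (fun row => PySem.List.pyGetD row 0 "")))
    lst2 PySem.Dict.empty hinv
  have hres := PySem.Dict.items_foldl_insert_fresh
    ((lst2.foldl (pvGroupStep (PySem.Set.ofList (lst1.map (fun row => PySem.List.pyGetD row 0 "")))) PySem.Dict.empty).items)
    (fun q => q.1) (fun q => pvEntry q.2) PySem.Dict.empty
    (fun a _ => by simp [PySem.Dict.contains, PySem.Dict.empty])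
    (by exact hG.2)
  simp only [pvMapD]
  rw [hres]
  simp [PySem.Dict.empty]
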